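-- pv_equiv track=rewrite | github.com/FAnzTvDev/ATLAS_CONTROL_SYSTEM | atlas_agents_v16_7/atlas_agents/v20_story_intelligence.py | get_emotion_intensity
-- ===== SOURCE A (Python) =====
-- from typing import Dict, List, Optional, Tuple
--
-- EMOTION_INTENSITY = {
--     # Low intensity (wide/medium) — scene-setting, neutral
--     "neutral": 2, "calm": 2, "observation": 2, "mundane": 1,
--     "quiet": 2, "still": 2, "peaceful": 2, "serene": 2,
--     # Mild engagement (3)
--     "curious": 3, "cautious": 3, "uncertain": 3, "wary": 3,
--     "contempl": 3, "ponder": 3, "thoughtful": 3, "reflect": 3,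
--     "hesita": 3, "reluct": 3, "comfort": 3, "warm": 3,
--     # Moderate engagement (4)
--     "concern": 4, "suspicion": 4, "interest": 4, "isol": 4,
--     "alone": 4, "lonely": 4, "uneasy": 4, "relief": 4, "hope": 4,
--     "nostalgic": 4, "melanchol": 4, "wistful": 4,
--     # Rising tension (5)
--     "determin": 5, "resolut": 5, "defian": 5, "brave": 5,
--     "tension": 5, "tense": 5, "anxiety": 5, "anxious": 5,
--     "urgency": 5, "urgent": 5, "conflict": 5, "nervous": 5,
--     "suspici": 5, "eerie": 5, "uneas": 5, "troubl": 5,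
--     "apprehens": 5, "forebod": 5, "ominous": 5,
--     # Significant emotion (6)
--     "confront": 6, "accus": 6, "demand": 6, "sinister": 6,
--     "menac": 6, "haunt": 6, "supernatural": 6, "ghostly": 6,
--     "discover": 6, "escap": 6, "abandon": 6, "betray": 6,
--     "disturb": 6, "distress": 6, "anguish": 6,
--     # High intensity (7)
--     "fear": 7, "dread": 7, "anger": 7, "threat": 7, "danger": 7,
--     "flee": 7, "mourn": 7, "realiz": 7, "sorrow": 7,
--     "panick": 7, "scream": 7, "cry": 7, "weep": 7,
--     # Peak emotion (8)
--     "grief": 8, "horror": 8, "shock": 8, "revelation": 8,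
--     "panick": 8, "violent": 8, "attack": 8,
--     # Extreme (9-10)
--     "despair": 9, "rage": 9, "terror": 10, "death": 9,
--     # Resolution (pulls back)
--     "acceptance": 3, "resolution": 3, "peace": 2,
-- }
--
-- def get_emotion_intensity(shot: Dict) -> int:
--     """Extract emotional intensity from ALL text fields on the shot."""
--     texts = []
--     texts.append((shot.get("description", "") or "").lower())
--     texts.append((shot.get("beat_description", "") or "").lower())
--     texts.append((shot.get("dialogue_text", "") or "").lower())
--     texts.append((shot.get("dialogue", "") or "").lower())
--     texts.append((shot.get("emotion", "") or "").lower())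
--     # Also scan nano_prompt — it has the richest text after enrichment
--     texts.append((shot.get("nano_prompt", "") or "").lower())
--     combined = " ".join(texts)
--
--     best_intensity = 2  # default neutral
--     for keyword, intensity in EMOTION_INTENSITY.items():
--         if keyword in combined:
--             best_intensity = max(best_intensity, intensity)
--
--     return best_intensity
-- ===== SOURCE B (Python) =====
-- # Early-exit scan: keywords grouped by intensity, checked from highest level down;
-- # the first level with a hit is the answer (keywords at intensity <= 2 cannot beat the default).
-- _FIELDS = ("description", "beat_description", "dialogue_text", "dialogue", "emotion", "nano_prompt")
--
-- _LEVELS = [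
--     (10, ("terror",)),
--     (9, ("despair", "rage", "death")),
--     (8, ("grief", "horror", "shock", "revelation", "panick", "violent", "attack")),
--     (7, ("fear", "dread", "anger", "threat", "danger", "flee", "mourn", "realiz",
--          "sorrow", "scream", "cry", "weep")),
--     (6, ("confront", "accus", "demand", "sinister", "menac", "haunt", "supernatural",
--          "ghostly", "discover", "escap", "abandon", "betray", "disturb", "distress",
--          "anguish")),
--     (5, ("determin", "resolut", "defian", "brave", "tension", "tense", "anxiety",
--          "anxious", "urgency", "urgent", "conflict", "nervous", "suspici", "eerie",
--          "uneas", "troubl", "apprehens", "forebod", "ominous")),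
--     (4, ("concern", "suspicion", "interest", "isol", "alone", "lonely", "uneasy",
--          "relief", "hope", "nostalgic", "melanchol", "wistful")),
--     (3, ("curious", "cautious", "uncertain", "wary", "contempl", "ponder",
--          "thoughtful", "reflect", "hesita", "reluct", "comfort", "warm",
--          "acceptance", "resolution")),
-- ]
--
-- def get_emotion_intensity(shot):
--     combined = " ".join((shot.get(f, "") or "").lower() for f in _FIELDS)
--     for level, kws in _LEVELS:
--         if any(k in combined for k in kws):
--             return level
--     return 2
-- ===== Notes on version B (the rewrite author's own statement) =====
-- stated objective: alternative
-- what changed: B groups the keywords by intensity level and scans the levels from highest to lowest, returning at the first level with any substring hit (keywords at intensity <= 2 are dropped since they cannot beat the default), instead of A's full table scan with a running max.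
import Mathlib
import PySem

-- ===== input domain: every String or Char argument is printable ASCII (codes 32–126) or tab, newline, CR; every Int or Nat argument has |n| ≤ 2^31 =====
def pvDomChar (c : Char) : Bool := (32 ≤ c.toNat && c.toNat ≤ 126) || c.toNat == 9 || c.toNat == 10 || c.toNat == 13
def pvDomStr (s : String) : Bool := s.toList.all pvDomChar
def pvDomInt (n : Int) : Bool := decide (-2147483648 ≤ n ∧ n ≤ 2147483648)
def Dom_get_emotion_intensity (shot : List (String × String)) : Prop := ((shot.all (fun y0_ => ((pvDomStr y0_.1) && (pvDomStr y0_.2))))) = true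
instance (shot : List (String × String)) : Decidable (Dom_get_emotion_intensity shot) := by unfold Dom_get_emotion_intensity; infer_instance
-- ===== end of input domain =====

-- B replaces the full keyword table scan with max-accumulator by an early-exit
-- scan of the keywords grouped by intensity, highest level first (objective: alternative).

-- ===== PORT A =====
-- `x or ""` applied to a str value (falsy strs are exactly "")
def pvOrEmpty (s : String) : String := if s == "" then "" else s

-- EMOTION_INTENSITY.items() in dict order: the duplicate key "panick" keeps its first
-- position and its last value 8, as in Python.
def pvTableA : List (String × Int) :=
  [("neutral", 2),
   ("calm", 2),
   ("observation", 2),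
   ("mundane", 1),
   ("quiet", 2),
   ("still", 2),
   ("peaceful", 2),
   ("serene", 2),
   ("curious", 3),
   ("cautious", 3),
   ("uncertain", 3),
   ("wary", 3),
   ("contempl", 3),
   ("ponder", 3),
   ("thoughtful", 3),
   ("reflect", 3),
   ("hesita", 3),
   ("reluct", 3),
   ("comfort", 3),
   ("warm", 3),
   ("concern", 4),
   ("suspicion", 4),
   ("interest", 4),
   ("isol", 4),
   ("alone", 4),
   ("lonely", 4),
   ("uneasy", 4),
   ("relief", 4),
   ("hope", 4),
   ("nostalgic", 4),
   ("melanchol", 4),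
   ("wistful", 4),
   ("determin", 5),
   ("resolut", 5),
   ("defian", 5),
   ("brave", 5),
   ("tension", 5),
   ("tense", 5),
   ("anxiety", 5),
   ("anxious", 5),
   ("urgency", 5),
   ("urgent", 5),
   ("conflict", 5),
   ("nervous", 5),
   ("suspici", 5),
   ("eerie", 5),
   ("uneas", 5),
   ("troubl", 5),
   ("apprehens", 5),
   ("forebod", 5),
   ("ominous", 5),
   ("confront", 6),
   ("accus", 6),
   ("demand", 6),
   ("sinister", 6),
   ("menac", 6),
   ("haunt", 6),
   ("supernatural", 6),
   ("ghostly", 6),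
   ("discover", 6),
   ("escap", 6),
   ("abandon", 6),
   ("betray", 6),
   ("disturb", 6),
   ("distress", 6),
   ("anguish", 6),
   ("fear", 7),
   ("dread", 7),
   ("anger", 7),
   ("threat", 7),
   ("danger", 7),
   ("flee", 7),
   ("mourn", 7),
   ("realiz", 7),
   ("sorrow", 7),
   ("panick", 8),
   ("scream", 7),
   ("cry", 7),
   ("weep", 7),
   ("grief", 8),
   ("horror", 8),
   ("shock", 8),
   ("revelation", 8),
   ("violent", 8),
   ("attack", 8),
   ("despair", 9),
   ("rage", 9),
   ("terror", 10),
   ("death", 9),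
   ("acceptance", 3),
   ("resolution", 3),
   ("peace", 2)]

def get_emotion_intensity (shot : List (String × String)) : Int :=
  let d := PySem.Dict.mk shot
  let texts : List String :=
    [PySem.Str.lower (pvOrEmpty (PySem.Dict.getD d "description" "")),
     PySem.Str.lower (pvOrEmpty (PySem.Dict.getD d "beat_description" "")),
     PySem.Str.lower (pvOrEmpty (PySem.Dict.getD d "dialogue_text" "")),
     PySem.Str.lower (pvOrEmpty (PySem.Dict.getD d "dialogue" "")),
     PySem.Str.lower (pvOrEmpty (PySem.Dict.getD d "emotion" "")),
     PySem.Str.lower (pvOrEmpty (PySem.Dict.getD d "nano_prompt" ""))]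
  let combined := PySem.Str.join " " texts
  pvTableA.foldl (fun best p => if PySem.Str.isIn p.1 combined then max best p.2 else best) 2

-- ===== PORT B =====
def pvFields : List String :=
  ["description", "beat_description", "dialogue_text", "dialogue", "emotion", "nano_prompt"]

def pvLevels : List (Int × List String) :=
  [(10, ["terror"]),
   (9, ["despair", "rage", "death"]),
   (8, ["grief", "horror", "shock", "revelation", "panick", "violent", "attack"]),
   (7, ["fear", "dread", "anger", "threat", "danger", "flee", "mourn", "realiz", "sorrow", "scream", "cry", "weep"]),
   (6, ["confront", "accus", "demand", "sinister", "menac", "haunt", "supernatural", "ghostly", "discover", "escap", "abandon", "betray", "disturb", "distress", "anguish"]),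
   (5, ["determin", "resolut", "defian", "brave", "tension", "tense", "anxiety", "anxious", "urgency", "urgent", "conflict", "nervous", "suspici", "eerie", "uneas", "troubl", "apprehens", "forebod", "ominous"]),
   (4, ["concern", "suspicion", "interest", "isol", "alone", "lonely", "uneasy", "relief", "hope", "nostalgic", "melanchol", "wistful"]),
   (3, ["curious", "cautious", "uncertain", "wary", "contempl", "ponder", "thoughtful", "reflect", "hesita", "reluct", "comfort", "warm", "acceptance", "resolution"])]

def pvScan (combined : String) : List (Int × List String) → Int
  | [] => 2
  | (l, kws) :: rest =>
      if kws.any (fun k => PySem.Str.isIn k combined) then l else pvScan combined rest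

def get_emotion_intensity_alt (shot : List (String × String)) : Int :=
  let d := PySem.Dict.mk shot
  let combined := PySem.Str.join " "
    (pvFields.map (fun f => PySem.Str.lower (pvOrEmpty (PySem.Dict.getD d f ""))))
  pvScan combined pvLevels

-- ===== PRECONDITION & SPEC =====
def Spec_get_emotion_intensity (shot : List (String × String)) (out : Int) : Prop := out = get_emotion_intensity_alt shot
instance (shot : List (String × String)) (out : Int) : Decidable (Spec_get_emotion_intensity shot out) := by unfold Spec_get_emotion_intensity; infer_instance

-- ===== CLAIM (what is proved, stated in full; the proofs are below) =====
def Claim_equal_get_emotion_intensity : Prop := ∀ (shot : List (String × String)), Dom_get_emotion_intensity shot → Spec_get_emotion_intensity shot (get_emotion_intensity shot)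

-- ===== LEMMAS AND PROOFS =====

-- A's loop step, abstracted over the combined text
def pvStep (c : String) (best : Int) (p : String × Int) : Int :=
  if PySem.Str.isIn p.1 c then max best p.2 else best

lemma pvStep_rc (c : String) (b : Int) (p q : String × Int) :
    pvStep c (pvStep c b p) q = pvStep c (pvStep c b q) p := by
  unfold pvStep; split_ifs <;>
    simp [max_assoc, max_comm p.2 q.2]

-- entries with intensity ≤ 2 never change the accumulator once it is ≥ 2
lemma pvFold_filter (c : String) :
    ∀ (t : List (String × Int)) (b : Int), 2 ≤ b →
    t.foldl (pvStep c) b = (t.filter (fun p => decide (2 < p.2))).foldl (pvStep c) b := by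
  intro t
  induction t with
  | nil => intro b _; rfl
  | cons p rest ih =>
      intro b hb
      by_cases h2 : 2 < p.2
      · simp only [List.filter_cons, h2, decide_true, List.foldl_cons]
        exact ih _ (by unfold pvStep; split_ifs <;> omega)
      · simp only [List.filter_cons, h2, decide_false, List.foldl_cons]
        have : pvStep c b p = b := by unfold pvStep; split_ifs <;> omega
        rw [this]; exact ih _ hb

-- a group of keywords all at the same intensity l
lemma pvFold_group (c : String) (l : Int) :
    ∀ (kws : List String) (b : Int),
    (kws.map (fun k => (k, l))).foldl (pvStep c) b
      = if kws.any (fun k => PySem.Str.isIn k c) then max b l else b := by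
  intro kws
  induction kws with
  | nil => intro b; simp
  | cons k rest ih =>
      intro b
      simp only [List.map_cons, List.foldl_cons, List.any_cons]
      have hstep : pvStep c b (k, l) = if PySem.Str.isIn k c then max b l else b := rfl
      rw [hstep]
      by_cases hk : PySem.Str.isIn k c
      · simp only [hk, if_true, Bool.true_or, ih]
        split_ifs
        · rw [max_assoc, max_self]
        · rfl
      · have hk' : PySem.Str.isIn k c = false := by simpa using hk
        simp only [hk', Bool.false_eq_true, if_false, Bool.false_or, ih]

-- once the accumulator dominates every remaining intensity the fold is constant
lemma pvFold_fix (c : String) :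
    ∀ (t : List (String × Int)) (b : Int), (∀ p ∈ t, p.2 ≤ b) →
    t.foldl (pvStep c) b = b := by
  intro t
  induction t with
  | nil => intro b _; rfl
  | cons p rest ih =>
      intro b hb
      have h1 : pvStep c b p = b := by
        unfold pvStep; have := hb p (by simp); split_ifs <;> omega
      simp only [List.foldl_cons, h1]
      exact ih b (fun q hq => hb q (by simp [hq]))

-- descending grouped scan = max-fold over the flattened groups
lemma pvScan_eq_fold (c : String) :
    ∀ (g : List (Int × List String)),
    g.Pairwise (fun a b => b.1 < a.1) → (∀ p ∈ g, 2 < p.1) →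
    (g.flatMap (fun p => p.2.map (fun k => (k, p.1)))).foldl (pvStep c) 2 = pvScan c g := by
  intro g
  induction g with
  | nil => intro _ _; rfl
  | cons p rest ih =>
      intro hpw h2
      obtain ⟨l, kws⟩ := p
      have hl : (2 : Int) < l := h2 (l, kws) (by simp)
      simp only [List.flatMap_cons, List.foldl_append, pvFold_group, pvScan]
      by_cases hany : kws.any (fun k => PySem.Str.isIn k c)
      · simp only [hany, if_true]
        have hmax : max 2 l = l := max_eq_right hl.le
        rw [hmax]
        apply pvFold_fix
        intro q hq
        simp only [List.mem_flatMap, List.mem_map] at hq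
        obtain ⟨r, hr, k, -, hk⟩ := hq
        subst hk
        exact ((List.pairwise_cons.mp hpw).1 r hr).le
      · simp only [hany]
        rw [if_neg (by simp [hany])]
        exact ih (List.pairwise_cons.mp hpw).2 (fun q hq => h2 q (by simp [hq]))

-- the flattened descending groups are a permutation of A's table restricted to intensity > 2
lemma pvPerm :
    (pvTableA.filter (fun p => decide (2 < p.2))).Perm
      (pvLevels.flatMap (fun p => p.2.map (fun k => (k, p.1)))) := by
  decide

lemma pvLevels_sorted : pvLevels.Pairwise (fun a b => b.1 < a.1) := by decide

lemma pvLevels_gt2 : ∀ p ∈ pvLevels, (2 : Int) < p.1 := by decide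

-- ===== VERDICT (by name: the statement is the Claim_ definition above) =====
theorem get_emotion_intensity_spec : Claim_equal_get_emotion_intensity := by
  intro shot _
  unfold Spec_get_emotion_intensity get_emotion_intensity get_emotion_intensity_alt
  simp only [pvFields, List.map_cons, List.map_nil]
  generalize PySem.Str.join " " _ = c
  show pvTableA.foldl (pvStep c) 2 = pvScan c pvLevels
  rw [pvFold_filter c pvTableA 2 le_rfl,
      @List.Perm.foldl_eq _ _ (pvStep c) _ _ ⟨fun b p q => pvStep_rc c b p q⟩ pvPerm 2,
      pvScan_eq_fold c pvLevels pvLevels_sorted pvLevels_gt2]
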